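-- pv_equiv track=rewrite | github.com/HetheshK/ALPR_2 | confusion.py | align_substitutions
-- ===== SOURCE A (Python) =====
-- def align_substitutions(pred: str, gt: str) -> list[tuple[str, str]]:
--     """
--     Edit-distance traceback to find character substitutions.
--     Returns list of (gt_char, pred_char) pairs where they differ.
--     Insertions and deletions are not counted — only substitutions.
--     """
--     m, n = len(pred), len(gt)
--     # Build full DP table
--     dp = [[0] * (n + 1) for _ in range(m + 1)]
--     for i in range(m + 1):
--         dp[i][0] = i
--     for j in range(n + 1):
--         dp[0][j] = j
--
--     for i in range(1, m + 1):
--         for j in range(1, n + 1):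
--             if pred[i - 1] == gt[j - 1]:
--                 dp[i][j] = dp[i - 1][j - 1]
--             else:
--                 dp[i][j] = 1 + min(dp[i - 1][j - 1], dp[i - 1][j], dp[i][j - 1])
--
--     # Traceback from bottom-right
--     subs = []
--     i, j = m, n
--     while i > 0 and j > 0:
--         if pred[i - 1] == gt[j - 1]:
--             i -= 1
--             j -= 1
--         elif dp[i][j] == dp[i - 1][j - 1] + 1:
--             # Substitution
--             subs.append((gt[j - 1], pred[i - 1]))  # (actual, predicted)
--             i -= 1
--             j -= 1
--         elif dp[i][j] == dp[i - 1][j] + 1: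
--             # Deletion from pred (extra char in gt)
--             i -= 1
--         else:
--             # Insertion into pred (extra char in pred)
--             j -= 1
--
--     return subs
-- ===== SOURCE B (Python) =====
-- def align_substitutions(pred: str, gt: str) -> list[tuple[str, str]]:
--     """
--     Fused single-pass DP: each cell carries (cost, substitution list of the
--     canonical optimal path to the origin), so the answer is read off the final
--     cell directly -- there is no traceback phase, and only one row is kept.
--     """
--     m, n = len(pred), len(gt)
--     prev = [(j, []) for j in range(n + 1)]
--     for i in range(1, m + 1):
--         pc = pred[i - 1]
--         cur = [(i, [])]
--         for j in range(1, n + 1):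
--             d, ds = prev[j - 1]
--             u, us = prev[j]
--             l, ls = cur[j - 1]
--             if pc == gt[j - 1]:
--                 cur.append((d, ds))
--             elif d <= u and d <= l:
--                 cur.append((d + 1, [(gt[j - 1], pc)] + ds))
--             elif u <= l:
--                 cur.append((u + 1, us))
--             else:
--                 cur.append((l + 1, ls))
--         prev = cur
--     return prev[n][1]
-- ===== Notes on version B (the rewrite author's own statement) =====
-- stated objective: alternative
-- what changed: B fuses the fill and the traceback into one forward row sweep: each DP cell carries (cost, substitution list of the canonical optimal path), only one row is kept, and the answer is read off the final cell, so A's backward value-comparison traceback phase disappears entirely.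
import Mathlib
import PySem

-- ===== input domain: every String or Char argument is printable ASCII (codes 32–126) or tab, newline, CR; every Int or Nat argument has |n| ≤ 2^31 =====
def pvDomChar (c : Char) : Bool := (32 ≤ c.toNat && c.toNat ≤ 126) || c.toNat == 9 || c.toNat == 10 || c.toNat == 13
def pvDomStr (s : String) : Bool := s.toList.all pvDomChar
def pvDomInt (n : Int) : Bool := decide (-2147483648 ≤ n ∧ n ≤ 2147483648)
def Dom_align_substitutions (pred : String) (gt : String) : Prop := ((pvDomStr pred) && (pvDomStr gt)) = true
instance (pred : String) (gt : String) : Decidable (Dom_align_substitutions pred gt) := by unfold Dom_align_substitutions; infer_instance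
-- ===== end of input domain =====

-- B fuses fill and traceback into one forward row sweep whose cells carry
-- (cost, substitution list of the canonical path); no traceback phase remains.

-- ===== PORT A =====
-- Row fill of A's DP table: for j = 1..n, dp[i][j] from dp[i-1][j-1] (ds.headD),
-- dp[i-1][j] (ds.tail.headD) and dp[i][j-1] (cur). Indices are always in range
-- by construction, so List.getD/headD defaults are never exercised.
def pvFillRowA (ci : Char) : Int → List Char → List Int → List Int
  | _, [], _ => []
  | cur, gj :: gs, ds =>
      let v := if ci = gj then ds.headD 0
               else 1 + min (ds.headD 0) (min (ds.tail.headD 0) cur)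
      v :: pvFillRowA ci v gs ds.tail

-- rows i = i'+1 .. m of the table, each built from the previous row
def pvRowsA (g : List Char) : List Char → Nat → List Int → List (List Int)
  | [], _, _ => []
  | ci :: ps, i', prev =>
      let row := ((i' : Int) + 1) :: pvFillRowA ci ((i' : Int) + 1) g prev
      row :: pvRowsA g ps (i' + 1) row

def pvTableA (p g : List Char) : List (List Int) :=
  let row0 : List Int := (List.range (g.length + 1)).map (Int.ofNat)
  row0 :: pvRowsA g p 0 row0

def pvGetT (T : List (List Int)) (i j : Nat) : Int := (T.getD i []).getD j 0

-- A's traceback: value comparisons against the DP table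
def pvTbA (p g : List Char) (T : List (List Int)) : Nat → Nat → List (String × String)
  | i + 1, j + 1 =>
      if p.getD i ' ' = g.getD j ' ' then pvTbA p g T i j
      else if pvGetT T (i + 1) (j + 1) = pvGetT T i j + 1 then
        (String.ofList [g.getD j ' '], String.ofList [p.getD i ' ']) :: pvTbA p g T i j
      else if pvGetT T (i + 1) (j + 1) = pvGetT T i (j + 1) + 1 then
        pvTbA p g T i (j + 1)
      else pvTbA p g T (i + 1) j
  | _, _ => []
termination_by i j => i + j

def align_substitutions (pred : String) (gt : String) : List (String × String) :=
  let p := pred.toList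
  let g := gt.toList
  pvTbA p g (pvTableA p g) p.length g.length

-- ===== PORT B =====
-- B's inner loop: each cell is (cost, substitution list of the canonical path);
-- ds is the previous row from column j0 on, cur the cell just built to the left.
def pvFillRowF (ci : Char) :
    (Int × List (String × String)) → List Char →
      List (Int × List (String × String)) → List (Int × List (String × String))
  | _, [], _ => []
  | cur, gj :: gs, ds =>
      let d := ds.headD (0, [])
      let u := ds.tail.headD (0, [])
      let c :=
        if ci = gj then d
        else if d.1 ≤ u.1 ∧ d.1 ≤ cur.1 then
          (d.1 + 1, (String.ofList [gj], String.ofList [ci]) :: d.2)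
        else if u.1 ≤ cur.1 then (u.1 + 1, u.2)
        else (cur.1 + 1, cur.2)
      c :: pvFillRowF ci c gs ds.tail

-- B's outer loop: replace the single kept row once per pred character
def pvRowsF (g : List Char) : List Char → Nat →
    List (Int × List (String × String)) → List (Int × List (String × String))
  | [], _, prev => prev
  | ci :: ps, i', prev =>
      pvRowsF g ps (i' + 1)
        ((((i' : Int) + 1), []) :: pvFillRowF ci (((i' : Int) + 1), []) g prev)

def align_substitutions_alt (pred : String) (gt : String) : List (String × String) :=
  let p := pred.toList
  let g := gt.toList
  let row0 := (List.range (g.length + 1)).map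
    (fun j => (Int.ofNat j, ([] : List (String × String))))
  ((pvRowsF g p 0 row0).getD g.length (0, [])).2

-- ===== PRECONDITION & SPEC =====
def Spec_align_substitutions (pred : String) (gt : String) (out : List (String × String)) : Prop := out = align_substitutions_alt pred gt
instance (pred : String) (gt : String) (out : List (String × String)) : Decidable (Spec_align_substitutions pred gt out) := by unfold Spec_align_substitutions; infer_instance

-- ===== CLAIM (what is proved, stated in full; the proofs are below) =====
def Claim_equal_align_substitutions : Prop := ∀ (pred : String) (gt : String), Dom_align_substitutions pred gt → Spec_align_substitutions pred gt (align_substitutions pred gt)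

-- ===== LEMMAS AND PROOFS =====

-- mathematical edit-distance table both ports compute
def pvE (p g : List Char) : Nat → Nat → Int
  | 0, j => (j : Int)
  | i + 1, 0 => (i : Int) + 1
  | i + 1, j + 1 =>
      if p.getD i ' ' = g.getD j ' ' then pvE p g i j
      else 1 + min (pvE p g i j) (min (pvE p g i (j + 1)) (pvE p g (i + 1) j))
termination_by i j => i + j

-- substitution list of the canonical optimal path from (i, j) to the border
def pvS (p g : List Char) : Nat → Nat → List (String × String)
  | 0, _ => []
  | _ + 1, 0 => []
  | i + 1, j + 1 =>
      if p.getD i ' ' = g.getD j ' ' then pvS p g i j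
      else if pvE p g i j ≤ pvE p g i (j + 1) ∧ pvE p g i j ≤ pvE p g (i + 1) j then
        (String.ofList [g.getD j ' '], String.ofList [p.getD i ' ']) :: pvS p g i j
      else if pvE p g i (j + 1) ≤ pvE p g (i + 1) j then pvS p g i (j + 1)
      else pvS p g (i + 1) j
termination_by i j => i + j

theorem pvGetD_map_range {α : Type} (f : Nat → α) (n j : Nat) (d : α) (h : j < n) :
    ((List.range n).map f).getD j d = f j := by
  simp [List.getD, h]

theorem pvHeadD_getD {α : Type} (xs : List α) (d : α) : xs.headD d = xs.getD 0 d := by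
  cases xs <;> simp [List.getD]

theorem pvGetD_tail {α : Type} (xs : List α) (k : Nat) (d : α) :
    xs.tail.getD k d = xs.getD (k + 1) d := by
  cases xs <;> simp [List.getD]

theorem pvFillRowA_spec (p g : List Char) (i' : Nat) :
    ∀ (gs : List Char) (j0 : Nat) (ds : List Int) (cur : Int),
      j0 + gs.length = g.length →
      (∀ k, k < gs.length → gs.getD k ' ' = g.getD (j0 + k) ' ') →
      (∀ k, k ≤ gs.length → ds.getD k 0 = pvE p g i' (j0 + k)) →
      cur = pvE p g (i' + 1) j0 →
      pvFillRowA (p.getD i' ' ') cur gs ds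
        = (List.range gs.length).map (fun k => pvE p g (i' + 1) (j0 + k + 1)) := by
  intro gs
  induction gs with
  | nil => intro j0 ds cur _ _ _ _; simp [pvFillRowA]
  | cons gj gs ih =>
    intro j0 ds cur hlen hch hds hcur
    have hgj : gj = g.getD j0 ' ' := by
      have := hch 0 (by simp); simpa [List.getD] using this
    have hd : ds.headD 0 = pvE p g i' j0 := by
      have := hds 0 (by simp)
      rw [pvHeadD_getD]; simpa using this
    have hu : ds.tail.headD 0 = pvE p g i' (j0 + 1) := by
      have := hds 1 (by simp)
      rw [← pvGetD_tail] at this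
      rw [pvHeadD_getD]; exact this
    have hv : (if p.getD i' ' ' = gj then ds.headD 0
               else 1 + min (ds.headD 0) (min (ds.tail.headD 0) cur))
              = pvE p g (i' + 1) (j0 + 1) := by
      rw [hgj, hd, hu, hcur]
      simp only [pvE]
    rw [pvFillRowA]
    rw [hv]
    have hrec := ih (j0 + 1) ds.tail (pvE p g (i' + 1) (j0 + 1))
      (by simpa [Nat.add_comm, Nat.add_left_comm] using hlen)
      (by intro k hk
          have := hch (k + 1) (by simpa using Nat.succ_lt_succ hk)
          simpa [List.getD, Nat.add_comm, Nat.add_left_comm, Nat.add_assoc] using this)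
      (by intro k hk
          rw [pvGetD_tail]
          have := hds (k + 1) (by simpa using Nat.succ_le_succ hk)
          simpa [Nat.add_comm, Nat.add_left_comm, Nat.add_assoc] using this)
      rfl
    rw [hrec]
    simp only [List.length_cons, List.range_succ_eq_map, List.map_cons, List.map_map]
    refine congrArg₂ List.cons rfl (List.map_congr_left ?_)
    intro k _
    simp only [Function.comp_apply]
    congr 1
    omega

-- the full row i of the table, including the leading dp[i][0] = i
theorem pvRow_eq (p g : List Char) (i' : Nat) (prev : List Int)
    (hprev : ∀ k, k ≤ g.length → prev.getD k 0 = pvE p g i' k) :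
    ((i' : Int) + 1) :: pvFillRowA (p.getD i' ' ') ((i' : Int) + 1) g prev
      = (List.range (g.length + 1)).map (fun j => pvE p g (i' + 1) j) := by
  have h := pvFillRowA_spec p g i' g 0 prev ((i' : Int) + 1)
    (by simp) (by intro k _; simp) (by intro k hk; simpa using hprev k hk)
    (by simp [pvE])
  rw [h, List.range_succ_eq_map, List.map_cons, List.map_map]
  congr 1
  · simp [pvE]
  · apply List.map_congr_left
    intro k _
    simp only [Function.comp_apply]
    congr 1
    omega

theorem pvRowsA_getD (p g : List Char) :
    ∀ (ps : List Char) (i' : Nat) (prev : List Int),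
      (∀ k, k < ps.length → ps.getD k ' ' = p.getD (i' + k) ' ') →
      (∀ k, k ≤ g.length → prev.getD k 0 = pvE p g i' k) →
      ∀ t, t < ps.length →
        (pvRowsA g ps i' prev).getD t []
          = (List.range (g.length + 1)).map (fun j => pvE p g (i' + t + 1) j) := by
  intro ps
  induction ps with
  | nil => intro i' prev _ _ t ht; simp at ht
  | cons ci ps ih =>
    intro i' prev hch hprev t ht
    have hci : ci = p.getD i' ' ' := by
      have := hch 0 (by simp); simpa [List.getD] using this
    have hrow : ((i' : Int) + 1) :: pvFillRowA ci ((i' : Int) + 1) g prev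
        = (List.range (g.length + 1)).map (fun j => pvE p g (i' + 1) j) := by
      rw [hci]; exact pvRow_eq p g i' prev hprev
    cases t with
    | zero => simpa [pvRowsA, List.getD] using hrow
    | succ t =>
      rw [pvRowsA]
      simp only [List.getD_cons_succ]
      have := ih (i' + 1) (((i' : Int) + 1) :: pvFillRowA ci ((i' : Int) + 1) g prev)
        (by intro k hk
            have := hch (k + 1) (by simpa using Nat.succ_lt_succ hk)
            simpa [List.getD, Nat.add_comm, Nat.add_left_comm, Nat.add_assoc] using this)
        (by intro k hk
            rw [hrow]
            exact pvGetD_map_range _ _ _ _ (by omega))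
        t (by simpa using Nat.lt_of_succ_lt_succ ht)
      rw [this]
      have harg : i' + 1 + t + 1 = i' + (t + 1) + 1 := by omega
      rw [harg]

theorem pvGetT_eq (p g : List Char) (i j : Nat) (hi : i ≤ p.length) (hj : j ≤ g.length) :
    pvGetT (pvTableA p g) i j = pvE p g i j := by
  unfold pvGetT pvTableA
  cases i with
  | zero =>
    simp only [List.getD_cons_zero]
    rw [pvGetD_map_range _ _ _ _ (by omega)]
    simp [pvE]
  | succ i' =>
    simp only [List.getD_cons_succ]
    rw [pvRowsA_getD p g p 0 _ (by intro k _; simp) ?hprev i' (by omega)]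
    · rw [pvGetD_map_range _ _ _ _ (by omega)]
      norm_num
    case hprev =>
      intro k hk
      rw [pvGetD_map_range _ _ _ _ (by omega)]
      simp [pvE]

-- B's inner loop computes (pvE, pvS) cell by cell
theorem pvFillRowF_spec (p g : List Char) (i' : Nat) :
    ∀ (gs : List Char) (j0 : Nat) (ds : List (Int × List (String × String)))
      (cur : Int × List (String × String)),
      j0 + gs.length = g.length →
      (∀ k, k < gs.length → gs.getD k ' ' = g.getD (j0 + k) ' ') →
      (∀ k, k ≤ gs.length → ds.getD k (0, []) = (pvE p g i' (j0 + k), pvS p g i' (j0 + k))) →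
      cur = (pvE p g (i' + 1) j0, pvS p g (i' + 1) j0) →
      pvFillRowF (p.getD i' ' ') cur gs ds
        = (List.range gs.length).map
            (fun k => (pvE p g (i' + 1) (j0 + k + 1), pvS p g (i' + 1) (j0 + k + 1))) := by
  intro gs
  induction gs with
  | nil => intro j0 ds cur _ _ _ _; simp [pvFillRowF]
  | cons gj gs ih =>
    intro j0 ds cur hlen hch hds hcur
    have hgj : gj = g.getD j0 ' ' := by
      have := hch 0 (by simp); simpa [List.getD] using this
    have hd : ds.headD (0, []) = (pvE p g i' j0, pvS p g i' j0) := by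
      have := hds 0 (by simp)
      rw [pvHeadD_getD]; simpa using this
    have hu : ds.tail.headD (0, []) = (pvE p g i' (j0 + 1), pvS p g i' (j0 + 1)) := by
      have := hds 1 (by simp)
      rw [← pvGetD_tail] at this
      rw [pvHeadD_getD]; exact this
    have hc : (if p.getD i' ' ' = gj then ds.headD (0, [])
               else if (ds.headD (0, [])).1 ≤ (ds.tail.headD (0, [])).1 ∧
                       (ds.headD (0, [])).1 ≤ cur.1 then
                 ((ds.headD (0, [])).1 + 1,
                  (String.ofList [gj], String.ofList [p.getD i' ' ']) :: (ds.headD (0, [])).2)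
               else if (ds.tail.headD (0, [])).1 ≤ cur.1 then
                 ((ds.tail.headD (0, [])).1 + 1, (ds.tail.headD (0, [])).2)
               else (cur.1 + 1, cur.2))
              = (pvE p g (i' + 1) (j0 + 1), pvS p g (i' + 1) (j0 + 1)) := by
      rw [hgj, hd, hu, hcur]
      rw [pvE, pvS]
      split_ifs with h1 h2 h3
      · rfl
      · simp only [Prod.mk.injEq]
        exact ⟨by omega, trivial⟩
      · simp only [Prod.mk.injEq]
        exact ⟨by omega, trivial⟩
      · simp only [Prod.mk.injEq]
        exact ⟨by omega, trivial⟩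
    rw [pvFillRowF]
    simp only at hc ⊢
    rw [hc]
    have hrec := ih (j0 + 1) ds.tail (pvE p g (i' + 1) (j0 + 1), pvS p g (i' + 1) (j0 + 1))
      (by simpa [Nat.add_comm, Nat.add_left_comm] using hlen)
      (by intro k hk
          have := hch (k + 1) (by simpa using Nat.succ_lt_succ hk)
          simpa [List.getD, Nat.add_comm, Nat.add_left_comm, Nat.add_assoc] using this)
      (by intro k hk
          rw [pvGetD_tail]
          have := hds (k + 1) (by simpa using Nat.succ_le_succ hk)
          simpa [Nat.add_comm, Nat.add_left_comm, Nat.add_assoc] using this)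
      rfl
    rw [hrec]
    simp only [List.length_cons, List.range_succ_eq_map, List.map_cons, List.map_map]
    refine congrArg₂ List.cons rfl (List.map_congr_left ?_)
    intro k _
    simp only [Function.comp_apply]
    have harg : j0 + 1 + k + 1 = j0 + (k + 1) + 1 := by omega
    rw [harg]

-- B's outer loop preserves the row invariant through to the last row
theorem pvRowsF_spec (p g : List Char) :
    ∀ (ps : List Char) (i' : Nat) (prev : List (Int × List (String × String))),
      (∀ k, k < ps.length → ps.getD k ' ' = p.getD (i' + k) ' ') →
      (∀ k, k ≤ g.length → prev.getD k (0, []) = (pvE p g i' k, pvS p g i' k)) →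
      ∀ k, k ≤ g.length →
        (pvRowsF g ps i' prev).getD k (0, [])
          = (pvE p g (i' + ps.length) k, pvS p g (i' + ps.length) k) := by
  intro ps
  induction ps with
  | nil =>
    intro i' prev _ hprev k hk
    simpa [pvRowsF] using hprev k hk
  | cons ci ps ih =>
    intro i' prev hch hprev k hk
    have hci : ci = p.getD i' ' ' := by
      have := hch 0 (by simp); simpa [List.getD] using this
    have hzero : (((i' : Int) + 1), ([] : List (String × String)))
        = (pvE p g (i' + 1) 0, pvS p g (i' + 1) 0) := by
      simp [pvE, pvS]
    have hfill : pvFillRowF ci (((i' : Int) + 1), []) g prev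
        = (List.range g.length).map
            (fun k => (pvE p g (i' + 1) (k + 1), pvS p g (i' + 1) (k + 1))) := by
      rw [hci]
      have := pvFillRowF_spec p g i' g 0 prev (((i' : Int) + 1), [])
        (by simp) (by intro k _; simp)
        (by intro k hk; simpa using hprev k hk)
        (by simpa using hzero)
      simpa using this
    have hprev' : ∀ k, k ≤ g.length →
        ((((i' : Int) + 1), ([] : List (String × String)))
          :: pvFillRowF ci (((i' : Int) + 1), []) g prev).getD k (0, [])
          = (pvE p g (i' + 1) k, pvS p g (i' + 1) k) := by
      intro k hk
      cases k with
      | zero => simpa using hzero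
      | succ k =>
        simp only [List.getD_cons_succ]
        rw [hfill]
        exact pvGetD_map_range _ _ _ _ (by omega)
    rw [pvRowsF]
    have := ih (i' + 1) _
      (by intro k hk
          have := hch (k + 1) (by simpa using Nat.succ_lt_succ hk)
          simpa [List.getD, Nat.add_comm, Nat.add_left_comm, Nat.add_assoc] using this)
      hprev' k hk
    rw [this]
    have harg : i' + 1 + ps.length = i' + (ps.length + 1) := by omega
    rw [harg]
    simp

-- A's traceback follows exactly the canonical path of pvS
theorem pvTb_eq (p g : List Char) :
    ∀ (N i j : Nat), i + j ≤ N → i ≤ p.length → j ≤ g.length →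
      pvTbA p g (pvTableA p g) i j = pvS p g i j := by
  intro N
  induction N with
  | zero =>
    intro i j hN hi hj
    match i, j with
    | 0, _ => simp [pvTbA, pvS]
    | _ + 1, 0 => simp [pvTbA, pvS]
    | _ + 1, _ + 1 => omega
  | succ N ih =>
    intro i j hN hi hj
    match i, j with
    | 0, _ => simp [pvTbA, pvS]
    | _ + 1, 0 => simp [pvTbA, pvS]
    | i' + 1, j' + 1 =>
      rw [pvTbA, pvS]
      rw [pvGetT_eq p g (i' + 1) (j' + 1) hi hj,
          pvGetT_eq p g i' j' (by omega) (by omega),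
          pvGetT_eq p g i' (j' + 1) (by omega) hj]
      by_cases hc : p.getD i' ' ' = g.getD j' ' '
      · simp only [hc, if_true]
        exact ih i' j' (by omega) (by omega) (by omega)
      · rw [if_neg hc, if_neg hc]
        have hE : pvE p g (i' + 1) (j' + 1)
            = 1 + min (pvE p g i' j') (min (pvE p g i' (j' + 1)) (pvE p g (i' + 1) j')) := by
          rw [pvE]; rw [if_neg hc]
        by_cases hS : pvE p g i' j' ≤ pvE p g i' (j' + 1) ∧ pvE p g i' j' ≤ pvE p g (i' + 1) j'
        · rw [if_pos hS]
          have h1 : pvE p g (i' + 1) (j' + 1) = pvE p g i' j' + 1 := by omega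
          rw [if_pos h1]
          rw [ih i' j' (by omega) (by omega) (by omega)]
        · rw [if_neg hS]
          have h1 : ¬ pvE p g (i' + 1) (j' + 1) = pvE p g i' j' + 1 := by omega
          rw [if_neg h1]
          by_cases hU : pvE p g i' (j' + 1) ≤ pvE p g (i' + 1) j'
          · rw [if_pos hU]
            have h2 : pvE p g (i' + 1) (j' + 1) = pvE p g i' (j' + 1) + 1 := by omega
            rw [if_pos h2]
            exact ih i' (j' + 1) (by omega) (by omega) hj
          · rw [if_neg hU]
            have h2 : ¬ pvE p g (i' + 1) (j' + 1) = pvE p g i' (j' + 1) + 1 := by omega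
            rw [if_neg h2]
            exact ih (i' + 1) j' (by omega) hi (by omega)

-- B's port returns pvS at (m, n)
theorem pvAlt_eq (pred gt : String) :
    align_substitutions_alt pred gt = pvS pred.toList gt.toList pred.toList.length gt.toList.length := by
  unfold align_substitutions_alt
  simp only
  rw [pvRowsF_spec pred.toList gt.toList pred.toList 0 _
        (by intro k _; simp)
        (by intro k hk
            rw [pvGetD_map_range _ _ _ _ (by omega)]
            simp [pvE, pvS])
        gt.toList.length le_rfl]
  simp

-- ===== VERDICT (by name: the statement is the Claim_ definition above) =====
theorem align_substitutions_spec : Claim_equal_align_substitutions := by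
  intro pred gt _
  unfold Spec_align_substitutions align_substitutions
  rw [pvAlt_eq]
  exact pvTb_eq pred.toList gt.toList (pred.toList.length + gt.toList.length)
    pred.toList.length gt.toList.length le_rfl le_rfl le_rfl
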